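-- pv_equiv track=rewrite | github.com/sarvaniny/fake-job-detection-project | app.py | company_email_mismatch
-- ===== SOURCE A (Python) =====
-- KNOWN_COMPANIES = [
-- "amazon","google","microsoft","apple","meta","netflix","tesla","ibm"
-- ]
--
-- def company_email_mismatch(text,email):
--
--     if not email:
--         return False
--
--     domain=email.split("@")[-1]
--
--     for company in KNOWN_COMPANIES:
--         if company in text.lower() and company not in domain:
--             return True
--
--     return False
-- ===== SOURCE B (Python) =====
-- KNOWN_COMPANIES = [
-- "amazon","google","microsoft","apple","meta","netflix","tesla","ibm"
-- ]
--
-- def company_email_mismatch(text, email):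
--     if not email:
--         return False
--     domain = email.split("@")[-1]
--     low = text.lower()
--     # companies whose mention would be a mismatch (not covered by the domain)
--     bad = [c for c in KNOWN_COMPANIES if c not in domain]
--     # position-driven scan: at each index of the text, try to match a bad company
--     for i in range(len(low)):
--         for c in bad:
--             if low[i:i+len(c)] == c:
--                 return True
--     return False
-- ===== Notes on version B (the rewrite author's own statement) =====
-- stated objective: alternative
-- what changed: Replaces A's per-company substring-membership loop with a position-driven naive multi-pattern matcher: first filter the companies not covered by the email domain, then scan every index of the lowercased text and compare a slice against each remaining pattern.
import Mathlib
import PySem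

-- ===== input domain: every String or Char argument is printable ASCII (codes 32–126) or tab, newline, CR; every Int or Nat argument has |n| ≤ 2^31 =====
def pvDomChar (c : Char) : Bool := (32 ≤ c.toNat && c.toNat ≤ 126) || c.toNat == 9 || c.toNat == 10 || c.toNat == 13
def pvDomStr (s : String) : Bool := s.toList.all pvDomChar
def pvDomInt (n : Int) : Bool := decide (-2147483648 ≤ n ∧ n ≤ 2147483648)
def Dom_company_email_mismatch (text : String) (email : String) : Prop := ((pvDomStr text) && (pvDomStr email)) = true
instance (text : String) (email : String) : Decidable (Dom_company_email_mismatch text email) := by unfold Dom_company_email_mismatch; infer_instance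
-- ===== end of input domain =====

-- B replaces A's per-company substring scan with a position-driven naive multi-pattern
-- matcher over the text's indices (objective: alternative decomposition, same cost).

-- ===== PORT A =====
def knownCompanies : List String :=
  ["amazon","google","microsoft","apple","meta","netflix","tesla","ibm"]

-- A's 'for company in KNOWN_COMPANIES: if … return True' loop
def companyLoopA (low : String) (domain : String) : List String → Bool
  | [] => false
  | c :: rest =>
    if PySem.Str.isIn c low && !(PySem.Str.isIn c domain) then true
    else companyLoopA low domain rest

def company_email_mismatch (text : String) (email : String) : Bool :=
  if email == "" then false
  else
    let parts := (PySem.Str.split? email "@").getD []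
    let domain := (PySem.List.pyGet? parts (-1)).getD ""   -- parts is never empty, so no IndexError
    companyLoopA (PySem.Str.lower text) domain knownCompanies

-- ===== PORT B =====
-- B's inner 'for c in bad: if low[i:i+len(c)] == c: return True' loop
def matchAtB (low : String) (i : Int) : List String → Bool
  | [] => false
  | c :: rest =>
    if PySem.Str.slice low (some i) (some (i + PySem.Str.len c)) == c then true
    else matchAtB low i rest

-- B's outer 'for i in range(len(low)): …' loop
def scanB (low : String) (bad : List String) : List Int → Bool
  | [] => false
  | i :: rest => if matchAtB low i bad then true else scanB low bad rest

def company_email_mismatch_alt (text : String) (email : String) : Bool :=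
  if email == "" then false
  else
    let parts := (PySem.Str.split? email "@").getD []
    let domain := (PySem.List.pyGet? parts (-1)).getD ""
    let low := PySem.Str.lower text
    let bad := knownCompanies.filter (fun c => !(PySem.Str.isIn c domain))
    scanB low bad (PySem.List.pyRange 0 (PySem.Str.len low) 1)

-- ===== PRECONDITION & SPEC =====
def Spec_company_email_mismatch (text : String) (email : String) (out : Bool) : Prop := out = company_email_mismatch_alt text email
instance (text : String) (email : String) (out : Bool) : Decidable (Spec_company_email_mismatch text email out) := by unfold Spec_company_email_mismatch; infer_instance

-- ===== CLAIM (what is proved, stated in full; the proofs are below) =====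
def Claim_equal_company_email_mismatch : Prop := ∀ (text : String) (email : String), Dom_company_email_mismatch text email → Spec_company_email_mismatch text email (company_email_mismatch text email)

-- ===== LEMMAS AND PROOFS =====

theorem companyLoopA_eq_any (low domain : String) (l : List String) :
    companyLoopA low domain l
      = l.any (fun c => PySem.Str.isIn c low && !(PySem.Str.isIn c domain)) := by
  induction l with
  | nil => rfl
  | cons c rest ih =>
    simp only [companyLoopA, List.any_cons, ← ih]
    cases (PySem.Str.isIn c low && !(PySem.Str.isIn c domain)) <;> simp

theorem matchAtB_eq_any (low : String) (i : Int) (l : List String) :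
    matchAtB low i l
      = l.any (fun c => PySem.Str.slice low (some i) (some (i + PySem.Str.len c)) == c) := by
  induction l with
  | nil => rfl
  | cons c rest ih =>
    simp [matchAtB, List.any_cons, ih, beq_eq_decide]

theorem scanB_eq_any (low : String) (bad : List String) (l : List Int) :
    scanB low bad l = l.any (fun i => matchAtB low i bad) := by
  induction l with
  | nil => rfl
  | cons i rest ih =>
    cases hb : matchAtB low i bad <;> simp [scanB, hb, List.any_cons, ih]

-- a nonempty pattern occurs as a substring iff a length-|c| slice at some valid index equals it
theorem key_iff (low c : String) (hc : c.toList ≠ []) :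
    (∃ i : Int, (0 ≤ i ∧ i < (low.toList.length : Int)) ∧
        PySem.Str.slice low (some i) (some (i + (c.toList.length : Int))) = c)
      ↔ PySem.Str.isIn c low = true := by
  rw [PySem.Str.isIn_eq, ← PySem.Chars.exists_prefix_drop_iff_isIn]
  constructor
  · rintro ⟨i, ⟨h0, hlt⟩, heq⟩
    refine ⟨i.toNat, ?_⟩
    have hi : ((i.toNat : Nat) : Int) = i := Int.toNat_of_nonneg h0
    have h2 := congrArg String.toList heq
    rw [PySem.Str.toList_slice, PySem.Chars.slice_eq_listSlice, ← hi,
        PySem.List.slice_natCast_add] at h2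
    rw [← h2]
    exact List.take_prefix _ _
  · rintro ⟨j, hpre⟩
    have hj : j < low.toList.length := by
      by_contra hnot
      push Not at hnot
      rw [List.drop_eq_nil_of_le hnot] at hpre
      exact hc (List.prefix_nil.mp hpre)
    refine ⟨(j : Int), ⟨by positivity, by exact_mod_cast hj⟩, ?_⟩
    rw [← String.toList_inj, PySem.Str.toList_slice, PySem.Chars.slice_eq_listSlice,
        PySem.List.slice_natCast_add]
    exact (List.prefix_iff_eq_take.mp hpre).symm

theorem knownCompanies_nonempty : ∀ c ∈ knownCompanies, c.toList ≠ [] := by decide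

-- ===== VERDICT (by name: the statement is the Claim_ definition above) =====
theorem company_email_mismatch_spec : Claim_equal_company_email_mismatch := by
  intro text email _
  unfold Spec_company_email_mismatch company_email_mismatch company_email_mismatch_alt
  by_cases h : email == ""
  · simp [h]
  · simp only [Bool.not_eq_true] at h
    simp only [h, if_false, Bool.false_eq_true]
    rw [companyLoopA_eq_any, scanB_eq_any]
    rw [Bool.eq_iff_iff]
    simp only [matchAtB_eq_any, List.any_eq_true, List.mem_filter, Bool.and_eq_true,
      Bool.not_eq_true', PySem.List.mem_pyRange_one, PySem.Str.len_eq, beq_iff_eq]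
    constructor
    · rintro ⟨c, hcmem, hlow, hdom⟩
      obtain ⟨i, hi, heq⟩ :=
        (key_iff (PySem.Str.lower text) c (knownCompanies_nonempty c hcmem)).mpr hlow
      exact ⟨i, hi, c, ⟨hcmem, hdom⟩, heq⟩
    · rintro ⟨i, hi, c, ⟨hcmem, hdom⟩, heq⟩
      exact ⟨c, hcmem,
        (key_iff (PySem.Str.lower text) c (knownCompanies_nonempty c hcmem)).mp
          ⟨i, hi, heq⟩, hdom⟩
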